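-- pv_equiv track=rewrite | github.com/Ashiq-am/Path-of-Python | 39.Python Programming Examples/3.List Programs/Python  Reverse sequence of strictly increasing integers in a list/Method #1.py | reverseOrder
-- ===== SOURCE A (Python) =====
-- def reverseOrder(lst):
--     res = []
--     block = []
--     for i in lst:
--
--         # check if the current element is less
--         # than the last element of block
--         if block and i < block[-1]:
--
--             # add reversed chunk to 'res'
--             res.extend(block[::-1])
--             block[:] = [i]
--         else:
--
--             # append the element to 'block'
--             block.append(i)
--
--     # extend 'res' by reversing block
--     res.extend(block[::-1])
--     return (res)
-- ===== SOURCE B (Python) =====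
-- def reverseOrder(lst):
--     # Two-pointer run scan: find the end of each maximal weakly-increasing run
--     # by index, then append that slice reversed. No element accumulator.
--     res = []
--     n = len(lst)
--     i = 0
--     while i < n:
--         j = i + 1
--         while j < n and lst[j] >= lst[j - 1]:
--             j += 1
--         res.extend(lst[i:j][::-1])
--         i = j
--     return res
-- ===== Notes on version B (the rewrite author's own statement) =====
-- stated objective: idiomatic
-- what changed: B replaces A's mutable run-accumulator list (block built element by element, flushed reversed on each strict decrease) by an index-based two-pointer scan that locates each maximal weakly-increasing run's end and appends the reversed slice directly.
import Mathlib
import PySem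

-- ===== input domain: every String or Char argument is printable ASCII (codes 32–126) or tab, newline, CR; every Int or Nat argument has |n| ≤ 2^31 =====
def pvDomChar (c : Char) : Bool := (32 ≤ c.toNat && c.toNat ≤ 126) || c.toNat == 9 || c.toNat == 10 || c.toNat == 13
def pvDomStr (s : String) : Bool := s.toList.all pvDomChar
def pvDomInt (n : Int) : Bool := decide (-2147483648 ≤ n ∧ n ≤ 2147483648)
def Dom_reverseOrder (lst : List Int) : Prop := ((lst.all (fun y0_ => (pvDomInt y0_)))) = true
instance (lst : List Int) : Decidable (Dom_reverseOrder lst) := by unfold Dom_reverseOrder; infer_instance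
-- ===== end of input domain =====

-- B reverses each maximal weakly-increasing run via an index-based two-pointer
-- scan instead of A's mutable run-accumulator list; same asymptotic cost.

-- ===== PORT A =====
-- A's loop over `lst` with state (res, block); `block and i < block[-1]` is the
-- short-circuit test on block's last element.
def reverseOrderLoopA (res block : List Int) : List Int → List Int
  | [] => res ++ block.reverse
  | i :: t =>
    match block.getLast? with
    | some b =>
      if i < b then reverseOrderLoopA (res ++ block.reverse) [i] t
      else reverseOrderLoopA res (block ++ [i]) t
    | none => reverseOrderLoopA res (block ++ [i]) t

def reverseOrder (lst : List Int) : List Int := reverseOrderLoopA [] [] lst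

-- ===== PORT B =====
-- inner while: `while j < n and lst[j] >= lst[j-1]: j += 1` (j ≥ 1 at entry,
-- and lst[j] is only read when j < n, so getD's default is never used)
def reverseOrderRunEnd (lst : List Int) (j : Nat) : Nat :=
  if h : j < lst.length ∧ lst.getD (j - 1) 0 ≤ lst.getD j 0 then
    reverseOrderRunEnd lst (j + 1)
  else j
termination_by lst.length - j
decreasing_by exact Nat.sub_succ_lt_self _ _ h.1

theorem reverseOrderRunEnd_gt (lst : List Int) (j : Nat) :
    j ≤ reverseOrderRunEnd lst j := by
  fun_induction reverseOrderRunEnd with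
  | case1 j h ih => omega
  | case2 j h => omega

-- outer while: `while i < n: j := runEnd(i+1); res += lst[i:j][::-1]; i := j`
def reverseOrderLoopB (lst res : List Int) (i : Nat) : List Int :=
  if h : i < lst.length then
    let j := reverseOrderRunEnd lst (i + 1)
    reverseOrderLoopB lst (res ++ ((lst.drop i).take (j - i)).reverse) j
  else res
termination_by lst.length - i
decreasing_by exact Nat.sub_lt_sub_left h (Nat.lt_of_lt_of_le (Nat.lt_succ_self i) (reverseOrderRunEnd_gt lst (i + 1)))

def reverseOrder_alt (lst : List Int) : List Int := reverseOrderLoopB lst [] 0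

-- ===== PRECONDITION & SPEC =====
def Spec_reverseOrder (lst : List Int) (out : List Int) : Prop := out = reverseOrder_alt lst
instance (lst : List Int) (out : List Int) : Decidable (Spec_reverseOrder lst out) := by unfold Spec_reverseOrder; infer_instance

-- ===== CLAIM (what is proved, stated in full; the proofs are below) =====
def Claim_equal_reverseOrder : Prop := ∀ (lst : List Int), Dom_reverseOrder lst → Spec_reverseOrder lst (reverseOrder lst)

-- ===== LEMMAS AND PROOFS =====

-- reference function: split off the maximal weakly-increasing run
def splitRun (prev : Int) : List Int → List Int × List Int
  | [] => ([], [])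
  | x :: t =>
    if x < prev then ([], x :: t)
    else
      let p := splitRun x t
      (x :: p.1, p.2)

theorem splitRun_cons_lt (prev x : Int) (t : List Int) (h : x < prev) :
    splitRun prev (x :: t) = ([], x :: t) := by simp [splitRun, h]

theorem splitRun_cons_ge (prev x : Int) (t : List Int) (h : ¬ x < prev) :
    splitRun prev (x :: t) = (x :: (splitRun x t).1, (splitRun x t).2) := by simp [splitRun, h]

theorem splitRun_snd_len (prev : Int) (t : List Int) :
    (splitRun prev t).2.length ≤ t.length := by
  fun_induction splitRun with
  | case1 => simp
  | case2 => simp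
  | case3 prev x t h p ih => simpa [splitRun, h, p] using Nat.le_succ_of_le ih

def runsRev : List Int → List Int
  | [] => []
  | x :: t =>
    let p := splitRun x t
    (x :: p.1).reverse ++ runsRev p.2
termination_by l => l.length
decreasing_by exact Nat.lt_succ_of_le (splitRun_snd_len x t)

theorem splitRun_append (prev : Int) (t : List Int) :
    (splitRun prev t).1 ++ (splitRun prev t).2 = t := by
  fun_induction splitRun with
  | case1 => simp
  | case2 => simp
  | case3 prev x t h p ih => simpa [p] using ih

-- A's loop equals the reference, for a nonempty block with last element b
theorem loopA_runs (t : List Int) : ∀ (res blk : List Int) (b : Int),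
    blk.getLast? = some b →
    reverseOrderLoopA res blk t =
      res ++ (blk ++ (splitRun b t).1).reverse ++ runsRev (splitRun b t).2 := by
  induction t with
  | nil => intro res blk b hb; simp [reverseOrderLoopA, splitRun, runsRev]
  | cons i t ih =>
    intro res blk b hb
    by_cases hib : i < b
    · rw [show reverseOrderLoopA res blk (i :: t) = reverseOrderLoopA (res ++ blk.reverse) [i] t
            from by simp [reverseOrderLoopA, hb, hib],
          ih (res ++ blk.reverse) [i] i (by simp), splitRun_cons_lt b i t hib,
          show runsRev (i :: t) = (i :: (splitRun i t).1).reverse ++ runsRev (splitRun i t).2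
            from by rw [runsRev]]
      simp
    · rw [show reverseOrderLoopA res blk (i :: t) = reverseOrderLoopA res (blk ++ [i]) t
            from by simp [reverseOrderLoopA, hb, hib],
          ih res (blk ++ [i]) i (by simp), splitRun_cons_ge b i t hib]
      simp

-- runEnd computes the length of the run that splitRun splits off (fuel-indexed induction)
theorem runEnd_splitRun (lst : List Int) : ∀ (fuel j : Nat), lst.length ≤ j + fuel →
    reverseOrderRunEnd lst j = j + (splitRun (lst.getD (j - 1) 0) (lst.drop j)).1.length ∧
    (splitRun (lst.getD (j - 1) 0) (lst.drop j)).2 = lst.drop (reverseOrderRunEnd lst j) := by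
  intro fuel
  induction fuel with
  | zero =>
    intro j hf
    have hd : lst.drop j = [] := List.drop_of_length_le (by omega)
    have hstop : reverseOrderRunEnd lst j = j := by
      rw [reverseOrderRunEnd, dif_neg (by omega)]
    rw [hstop, hd]
    exact ⟨by simp [splitRun], by simp [splitRun]⟩
  | succ fuel ih =>
    intro j hf
    by_cases hc : j < lst.length ∧ lst.getD (j - 1) 0 ≤ lst.getD j 0
    · obtain ⟨hj, hle⟩ := hc
      have hd : lst.drop j = lst.getD j 0 :: lst.drop (j + 1) := by
        rw [List.getD_eq_getElem lst 0 hj, List.drop_eq_getElem_cons hj]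
      have hrec := ih (j + 1) (by omega)
      rw [Nat.add_sub_cancel] at hrec
      have hstep : reverseOrderRunEnd lst j = reverseOrderRunEnd lst (j + 1) := by
        rw [reverseOrderRunEnd, dif_pos ⟨hj, hle⟩]
      rw [hstep, hd, splitRun_cons_ge _ _ _ (not_lt.mpr hle)]
      refine ⟨?_, hrec.2⟩
      rw [hrec.1, List.length_cons]
      omega
    · have hstop : reverseOrderRunEnd lst j = j := by
        rw [reverseOrderRunEnd, dif_neg hc]
      by_cases hj : j < lst.length
      · have hlt : lst.getD j 0 < lst.getD (j - 1) 0 := by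
          by_contra hc2; exact hc ⟨hj, by omega⟩
        have hd : lst.drop j = lst.getD j 0 :: lst.drop (j + 1) := by
          rw [List.getD_eq_getElem lst 0 hj, List.drop_eq_getElem_cons hj]
        rw [hstop, hd, splitRun_cons_lt _ _ _ hlt]
        exact ⟨by simp, by rw [← hd]⟩
      · have hd : lst.drop j = [] := List.drop_of_length_le (by omega)
        rw [hstop, hd]
        exact ⟨by simp [splitRun], by simp [splitRun]⟩
  
-- B's loop equals the reference (fuel-indexed induction)
theorem loopB_runs (lst : List Int) : ∀ (fuel i : Nat), lst.length ≤ i + fuel →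
    ∀ (res : List Int), reverseOrderLoopB lst res i = res ++ runsRev (lst.drop i) := by
  intro fuel
  induction fuel with
  | zero =>
    intro i hf res
    have hd : lst.drop i = [] := List.drop_of_length_le (by omega)
    rw [reverseOrderLoopB, dif_neg (by omega), hd, runsRev]
    simp
  | succ fuel ih =>
    intro i hf res
    by_cases h : i < lst.length
    · have hge := reverseOrderRunEnd_gt lst (i + 1)
      have hre := runEnd_splitRun lst lst.length (i + 1) (by omega)
      rw [Nat.add_sub_cancel] at hre
      have hd : lst.drop i = lst.getD i 0 :: lst.drop (i + 1) := by
        rw [List.getD_eq_getElem lst 0 h, List.drop_eq_getElem_cons h]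
      have hstep : reverseOrderLoopB lst res i
          = reverseOrderLoopB lst
              (res ++ ((lst.drop i).take (reverseOrderRunEnd lst (i + 1) - i)).reverse)
              (reverseOrderRunEnd lst (i + 1)) := by
        rw [reverseOrderLoopB, dif_pos h]
      have htake : (lst.drop i).take (reverseOrderRunEnd lst (i + 1) - i)
          = lst.getD i 0 :: (splitRun (lst.getD i 0) (lst.drop (i + 1))).1 := by
        rw [hd]
        have hlen : reverseOrderRunEnd lst (i + 1) - i
            = (splitRun (lst.getD i 0) (lst.drop (i + 1))).1.length + 1 := by
          rw [hre.1]; omega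
        rw [hlen, List.take_succ_cons]
        have happ := splitRun_append (lst.getD i 0) (lst.drop (i + 1))
        generalize splitRun (lst.getD i 0) (lst.drop (i + 1)) = q at happ ⊢
        rw [← happ, List.take_left]
      have hruns : runsRev (lst.drop i)
          = (lst.getD i 0 :: (splitRun (lst.getD i 0) (lst.drop (i + 1))).1).reverse
            ++ runsRev (splitRun (lst.getD i 0) (lst.drop (i + 1))).2 := by
        rw [hd, runsRev]
      rw [hstep, ih (reverseOrderRunEnd lst (i + 1)) (by omega), htake, hruns, hre.2]
      simp
    · have hd : lst.drop i = [] := List.drop_of_length_le (by omega)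
      rw [reverseOrderLoopB, dif_neg (by omega), hd, runsRev]
      simp

-- ===== VERDICT (by name: the statement is the Claim_ definition above) =====
theorem reverseOrder_spec : Claim_equal_reverseOrder := by
  intro lst _
  unfold Spec_reverseOrder reverseOrder reverseOrder_alt
  rw [loopB_runs lst lst.length 0 (by omega) [], List.drop_zero]
  cases lst with
  | nil => simp [reverseOrderLoopA, runsRev]
  | cons x t =>
    rw [show reverseOrderLoopA [] [] (x :: t) = reverseOrderLoopA [] [x] t
          from by simp [reverseOrderLoopA],
        loopA_runs t [] [x] x (by simp),
        show runsRev (x :: t) = (x :: (splitRun x t).1).reverse ++ runsRev (splitRun x t).2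
          from by rw [runsRev]]
    simp
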